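-- pv_equiv track=rewrite | github.com/rtmendes/justhtml | src/justhtml/node.py | _markdown_code_span
-- ===== SOURCE A (Python) =====
-- def _markdown_code_span(s: str | None) -> str:
--     if s is None:
--         s = ""
--     # Use a backtick fence longer than any run of backticks inside.
--     longest = 0
--     run = 0
--     for ch in s:
--         if ch == "`":
--             run += 1
--             if run > longest:
--                 longest = run
--         else:
--             run = 0
--     fence = "`" * (longest + 1)
--     # CommonMark requires a space if the content starts/ends with backticks.
--     needs_space = s.startswith("`") or s.endswith("`")
--     if needs_space:
--         return f"{fence} {s} {fence}"
--     return f"{fence}{s}{fence}"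
-- ===== SOURCE B (Python) =====
-- def _markdown_code_span(s: str | None) -> str:
--     if s is None:
--         s = ""
--     # Grow the fence by substring search instead of counting runs:
--     # the fence is the shortest backtick string not occurring in s.
--     fence = "`"
--     while fence in s:
--         fence += "`"
--     if s.startswith("`") or s.endswith("`"):
--         return f"{fence} {s} {fence}"
--     return f"{fence}{s}{fence}"
-- ===== Notes on version B (the rewrite author's own statement) =====
-- stated objective: faster
-- what changed: Replaces the running-count loop over characters (tracking current and longest backtick run) with growing the fence directly by substring search: the fence is the shortest backtick string that does not occur in s.
import Mathlib
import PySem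

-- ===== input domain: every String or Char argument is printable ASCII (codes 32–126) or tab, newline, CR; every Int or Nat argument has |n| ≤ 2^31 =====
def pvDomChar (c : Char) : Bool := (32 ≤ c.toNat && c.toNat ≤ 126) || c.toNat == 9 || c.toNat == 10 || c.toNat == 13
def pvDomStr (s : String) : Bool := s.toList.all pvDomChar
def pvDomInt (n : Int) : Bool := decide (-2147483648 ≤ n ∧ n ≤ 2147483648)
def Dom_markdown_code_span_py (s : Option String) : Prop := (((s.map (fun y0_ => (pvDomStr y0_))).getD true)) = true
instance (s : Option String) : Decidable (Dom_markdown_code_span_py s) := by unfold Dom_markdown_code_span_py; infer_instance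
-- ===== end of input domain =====

-- B grows the backtick fence by substring search ('`'*n in s) instead of A's running-count
-- scan over characters; alternative algorithm, proven to return the same string.


-- ===== PORT A =====
-- the body of A's for-loop: state = (longest, run)
def pvAStep (st : Nat × Nat) (ch : Char) : Nat × Nat :=
  if ch = '`' then
    (if st.2 + 1 > st.1 then st.2 + 1 else st.1, st.2 + 1)
  else (st.1, 0)

def markdown_code_span_py (s : Option String) : String :=
  let t := (s.getD "").toList
  let longest := (t.foldl pvAStep (0, 0)).1
  let fence := List.replicate (longest + 1) '`'
  if PySem.Chars.startswith t ['`'] || PySem.Chars.endswith t ['`'] then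
    String.ofList (fence ++ [' '] ++ t ++ [' '] ++ fence)
  else
    String.ofList (fence ++ t ++ fence)

-- ===== PORT B =====
-- B's while-loop: grow the fence while it still occurs in the string
def pvGrow (t fence : List Char) : List Char :=
  if h : PySem.Chars.isIn fence t then pvGrow t (fence ++ ['`']) else fence
termination_by t.length + 1 - fence.length
decreasing_by
  have hle := List.IsInfix.length_le ((PySem.Chars.isIn_iff_infix fence t).mp h)
  simp
  omega

def markdown_code_span_py_alt (s : Option String) : String :=
  let t := (s.getD "").toList
  let fence := pvGrow t ['`']
  if PySem.Chars.startswith t ['`'] || PySem.Chars.endswith t ['`'] then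
    String.ofList (fence ++ [' '] ++ t ++ [' '] ++ fence)
  else
    String.ofList (fence ++ t ++ fence)

-- ===== PRECONDITION & SPEC =====
def Spec_markdown_code_span_py (s : Option String) (out : String) : Prop := out = markdown_code_span_py_alt s
instance (s : Option String) (out : String) : Decidable (Spec_markdown_code_span_py s out) := by unfold Spec_markdown_code_span_py; infer_instance

-- ===== CLAIM (what is proved, stated in full; the proofs are below) =====
def Claim_equal_markdown_code_span_py : Prop := ∀ (s : Option String), Dom_markdown_code_span_py s → Spec_markdown_code_span_py s (markdown_code_span_py s)

-- ===== LEMMAS AND PROOFS =====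

-- shorter backtick replicates are suffixes of longer ones
theorem pvRepSuffix {j k : Nat} (h : j ≤ k) :
    List.replicate j '`' <:+ List.replicate k '`' :=
  ⟨List.replicate (k - j) '`', by rw [← List.replicate_add]; congr 1; omega⟩

-- characterisation of A's fold: .1 bounds exactly which backtick replicates occur in t
-- (the longest run), .2 is the trailing backtick run (a maximal replicate suffix)
theorem pvFold_spec (t : List Char) :
    (∀ k : Nat, List.replicate k '`' <:+: t ↔ k ≤ (t.foldl pvAStep (0, 0)).1) ∧
    (List.replicate (t.foldl pvAStep (0, 0)).2 '`' <:+ t ∧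
     ¬ List.replicate ((t.foldl pvAStep (0, 0)).2 + 1) '`' <:+ t) := by
  induction t using List.reverseRecOn with
  | nil =>
    simp only [List.foldl_nil]
    refine ⟨fun k => ⟨fun h => by simpa using h.length_le, fun h => ?_⟩, by simp,
      fun h => by simpa using h.length_le⟩
    have : k = 0 := by omega
    simp [this]
  | append_singleton t c ih =>
    obtain ⟨⟨L, R⟩, hLR⟩ : ∃ p, List.foldl pvAStep (0, 0) t = p := ⟨_, rfl⟩
    rw [hLR] at ih
    obtain ⟨iha, ihb1, ihb2⟩ := ih
    have hRle : R ≤ L := (iha _).mp ihb1.isInfix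
    have hsufbound : ∀ j, List.replicate j '`' <:+ t → j ≤ R := by
      intro j hj
      by_contra hgt
      exact ihb2 ((pvRepSuffix (by omega)).trans hj)
    simp only [List.foldl_append, List.foldl_cons, List.foldl_nil, hLR]
    by_cases hc : c = '`'
    · subst hc
      have hstep : pvAStep (L, R) '`' = (max L (R + 1), R + 1) := by
        simp only [pvAStep]
        split_ifs <;> simp <;> omega
      rw [hstep]
      have hsfx : List.replicate (R + 1) '`' <:+ t ++ ['`'] := by
        obtain ⟨u, hu⟩ := ihb1
        exact ⟨u, by rw [List.replicate_succ', ← List.append_assoc, hu]⟩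
      refine ⟨fun k => ⟨fun h => ?_, fun hk => ?_⟩, hsfx, fun h => ?_⟩
      · obtain ⟨u, v, huv⟩ := h
        rcases List.eq_nil_or_concat v with hv | ⟨v', d, hv⟩
        · subst hv
          cases k with
          | zero => simp
          | succ j =>
            rw [List.replicate_succ'] at huv
            simp only [List.append_nil, ← List.append_assoc] at huv
            have hj : j ≤ R := hsufbound j ⟨u, List.append_cancel_right huv⟩
            simp only []
            omega
        · subst hv
          simp only [List.concat_eq_append, ← List.append_assoc] at huv
          have heq := (List.append_inj' huv rfl).1
          have : k ≤ L := (iha k).mp ⟨u, v', by simpa [List.append_assoc] using heq⟩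
          simp only []
          omega
      · rcases le_max_iff.mp (by simpa using hk) with h1 | h1
        · exact ((iha k).mpr h1).trans List.infix_append_left
        · exact ((pvRepSuffix h1).trans hsfx).isInfix
      · obtain ⟨u, hu⟩ := h
        rw [List.replicate_succ' (n := R + 1), ← List.append_assoc] at hu
        exact ihb2 ⟨u, List.append_cancel_right hu⟩
    · have hstep : pvAStep (L, R) c = (L, 0) := by
        simp only [pvAStep, if_neg hc]
      rw [hstep]
      refine ⟨fun k => ⟨fun h => ?_, fun hk => ?_⟩, by simp, fun h => ?_⟩
      · obtain ⟨u, v, huv⟩ := h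
        rcases List.eq_nil_or_concat v with hv | ⟨v', d, hv⟩
        · subst hv
          cases k with
          | zero => simp
          | succ j =>
            rw [List.replicate_succ'] at huv
            simp only [List.append_nil, ← List.append_assoc] at huv
            have := (List.append_inj' huv rfl).2
            simp at this
            exact absurd this.symm hc
        · subst hv
          simp only [List.concat_eq_append, ← List.append_assoc] at huv
          have heq := (List.append_inj' huv rfl).1
          exact (iha k).mp ⟨u, v', by simpa [List.append_assoc] using heq⟩
      · exact ((iha k).mpr hk).trans List.infix_append_left
      · obtain ⟨u, hu⟩ := h
        simp only [List.replicate_succ, List.replicate_zero] at hu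
        have := (List.append_inj' hu rfl).2
        simp at this
        exact absurd this.symm hc

-- B's fence loop, started on any fence still short enough, stops at length (longest + 1)
theorem pvGrow_eq (t : List Char) (n : Nat)
    (hn : n ≤ (t.foldl pvAStep (0, 0)).1 + 1) :
    pvGrow t (List.replicate n '`') =
      List.replicate ((t.foldl pvAStep (0, 0)).1 + 1) '`' := by
  obtain ⟨d, hd⟩ : ∃ d, n + d = (t.foldl pvAStep (0, 0)).1 + 1 :=
    ⟨(t.foldl pvAStep (0, 0)).1 + 1 - n, by omega⟩
  clear hn
  induction d generalizing n with
  | zero =>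
    rw [pvGrow]
    have hni : ¬ PySem.Chars.isIn (List.replicate n '`') t := by
      rw [PySem.Chars.isIn_iff_infix, (pvFold_spec t).1]
      omega
    rw [dif_neg hni, show n = (t.foldl pvAStep (0, 0)).1 + 1 by omega]
  | succ d ih =>
    rw [pvGrow]
    have hin : PySem.Chars.isIn (List.replicate n '`') t := by
      rw [PySem.Chars.isIn_iff_infix, (pvFold_spec t).1]
      omega
    rw [dif_pos hin, ← List.replicate_succ']
    exact ih (n + 1) (by omega)

-- ===== VERDICT (by name: the statement is the Claim_ definition above) =====
theorem markdown_code_span_py_spec : Claim_equal_markdown_code_span_py := by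
  intro s _
  unfold Spec_markdown_code_span_py markdown_code_span_py markdown_code_span_py_alt
  have h := pvGrow_eq ((s.getD "").toList) 1 (by omega)
  simp only [List.replicate_one] at h
  simp only [h]
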